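-- pv_equiv track=rewrite | github.com/ArmandtheMage/Card_Game | Player.py | are_in_line
-- ===== SOURCE A (Python) =====
-- def are_in_line(sequence:list, n_wilds:int):
--     previous_value = sequence[0]
--     for i in range(1, len(sequence)):
--         if sequence[i] == previous_value + 1:
--             previous_value += 1
--         elif n_wilds > 0:
--             n_wilds -= 1
--             previous_value += 1
--         else:
--             return False
--     return True
-- ===== SOURCE B (Python) =====
-- def are_in_line(sequence: list, n_wilds: int):
--     tally = {}
--     for i, v in enumerate(sequence):
--         tally[v - i] = tally.get(v - i, 0) + 1
--     return len(sequence) - tally[sequence[0]] <= max(n_wilds, 0)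
-- ===== Notes on version B (the rewrite author's own statement) =====
-- stated objective: alternative
-- what changed: Replaces A's stateful left-to-right walk (running previous_value, mutable wild budget, early-exit branches) by a frequency-dictionary approach: tally each value normalized by its index (v - i) into a dict, then read off the count of the key sequence[0] and compare len(sequence) minus that count with max(n_wilds, 0).
-- outside the precondition, e.g. on are_in_line([], 0): A raises IndexError, B raises IndexError
import Mathlib
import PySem

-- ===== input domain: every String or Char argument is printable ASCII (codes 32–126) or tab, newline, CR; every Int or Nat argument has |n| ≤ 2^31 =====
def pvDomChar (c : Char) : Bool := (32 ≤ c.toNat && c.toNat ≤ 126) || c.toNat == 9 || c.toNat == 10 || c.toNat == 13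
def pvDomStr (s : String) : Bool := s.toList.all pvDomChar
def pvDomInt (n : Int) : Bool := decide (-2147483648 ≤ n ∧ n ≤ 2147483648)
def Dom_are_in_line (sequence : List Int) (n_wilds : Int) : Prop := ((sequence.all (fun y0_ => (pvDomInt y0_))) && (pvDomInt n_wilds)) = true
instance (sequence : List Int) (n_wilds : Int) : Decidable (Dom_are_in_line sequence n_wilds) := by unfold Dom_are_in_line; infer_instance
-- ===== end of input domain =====

-- B replaces A's stateful walk (running previous_value, mutable wild budget, early exit)
-- by a frequency dictionary of index-normalized values v - i, reading off the count of
-- the key sequence[0] and comparing len - count with max(n_wilds, 0): a different data structure.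

-- ===== PORT A =====
-- the for-loop from index 1, carrying previous_value and the remaining wild budget; early 'return False'
def pvALoop : List Int → Int → Int → Bool
  | [], _, _ => true
  | x :: rest, pv, nw =>
    if x = pv + 1 then pvALoop rest (pv + 1) nw
    else if nw > 0 then pvALoop rest (pv + 1) (nw - 1)
    else false

def are_in_line (sequence : List Int) (n_wilds : Int) : Bool :=
  match sequence with
  | [] => false            -- sequence[0] raises IndexError; excluded by Pre_are_in_line
  | first :: rest => pvALoop rest first n_wilds

-- ===== PORT B =====
def are_in_line_alt (sequence : List Int) (n_wilds : Int) : Bool :=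
  match sequence with
  | [] => false            -- sequence[0] raises IndexError; excluded by Pre_are_in_line
  | first :: rest =>
    let tally : PySem.Dict Int Int :=
      (PySem.List.enumerate (first :: rest) 0).foldl
        (fun d p => d.insert (p.2 - p.1) (d.getD (p.2 - p.1) 0 + 1)) PySem.Dict.empty
    decide (((first :: rest).length : Int) - tally.getD first 0 ≤ max n_wilds 0)

-- ===== PRECONDITION & SPEC =====
-- A evaluates sequence[0] unconditionally, so it raises IndexError exactly on the empty list.
def Pre_are_in_line (sequence : List Int) (n_wilds : Int) : Prop := sequence ≠ []
instance (sequence : List Int) (n_wilds : Int) : Decidable (Pre_are_in_line sequence n_wilds) := by unfold Pre_are_in_line; infer_instance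
def pvWitness_are_in_line : List Int × Int := ([3, 4, 6], 1)

def Spec_are_in_line (sequence : List Int) (n_wilds : Int) (out : Bool) : Prop := out = are_in_line_alt sequence n_wilds
instance (sequence : List Int) (n_wilds : Int) (out : Bool) : Decidable (Spec_are_in_line sequence n_wilds out) := by unfold Spec_are_in_line; infer_instance

-- ===== CLAIM (what is proved, stated in full; the proofs are below) =====
def Claim_equal_are_in_line : Prop := ∀ (sequence : List Int) (n_wilds : Int), Dom_are_in_line sequence n_wilds → Pre_are_in_line sequence n_wilds → Spec_are_in_line sequence n_wilds (are_in_line sequence n_wilds)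

-- ===== LEMMAS AND PROOFS =====

-- Loop invariant for A: with previous_value = f + s - 1 entering index s, A's loop succeeds
-- iff the number of positions p with value ≠ f + index is within the clamped wild budget.
theorem pvALoop_eq (rest : List Int) : ∀ (f s nw : Int),
    pvALoop rest (f + s - 1) nw =
      decide (((((PySem.List.enumerate rest s).filter (fun p => decide (p.2 ≠ f + p.1))).length : Int)) ≤ max nw 0) := by
  induction rest with
  | nil =>
    intro f s nw
    simp [pvALoop, PySem.List.enumerate_nil]
  | cons x r ih =>
    intro f s nw
    rw [PySem.List.enumerate_cons]
    have h2 : f + s - 1 + 1 = f + (s + 1) - 1 := by ring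
    by_cases hx : x = f + s
    · have h1 : x = (f + s - 1) + 1 := by omega
      have hc : (decide (((s, x).2 : Int) ≠ f + (s, x).1)) = false := by simp [hx]
      simp only [pvALoop, if_pos h1, List.filter_cons, hc, Bool.false_eq_true, if_false]
      rw [h2, ih f (s + 1) nw]
    · have h1 : ¬ (x = (f + s - 1) + 1) := by omega
      have hc : (decide (((s, x).2 : Int) ≠ f + (s, x).1)) = true := by simp [hx]
      simp only [pvALoop, if_neg h1, List.filter_cons, hc]
      by_cases hnw : nw > 0
      · rw [if_pos hnw, h2, ih f (s + 1) (nw - 1)]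
        rw [decide_eq_decide]
        push_cast [List.length_cons]
        omega
      · rw [if_neg hnw]
        symm
        rw [decide_eq_false_iff_not]
        push_cast [List.length_cons]
        omega

-- Counting a key in the index-normalized list = length of the positional-match filter.
theorem pvCountMap (l : List (Int × Int)) (first : Int) :
    ((l.map (fun p => p.2 - p.1)).count first : Nat)
      = (l.filter (fun p => decide (p.2 - p.1 = first))).length := by
  induction l with
  | nil => simp
  | cons x r ih => by_cases h : x.2 - x.1 = first <;> simp [h, ih]

-- In any list, the elements matching a predicate and those failing it partition the length.
theorem pvFilter_partition {α : Type} (p : α → Bool) (l : List α) :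
    (l.filter p).length + (l.filter (fun a => !p a)).length = l.length := by
  induction l with
  | nil => simp
  | cons x r ih =>
    by_cases hx : p x = true
    · simp [hx]; omega
    · simp [hx]; omega

-- ===== VERDICT (by name: the statement is the Claim_ definition above) =====
theorem are_in_line_spec : Claim_equal_are_in_line := by
  intro sequence n_wilds _ hpre
  unfold Spec_are_in_line are_in_line are_in_line_alt
  match sequence with
  | [] => exact absurd rfl hpre
  | first :: rest =>
    simp only
    -- rewrite B's tally lookup as a count over the index-normalized list
    have hfold :
        ((PySem.List.enumerate (first :: rest) 0).foldl
          (fun d p => d.insert (p.2 - p.1) (d.getD (p.2 - p.1) 0 + 1)) PySem.Dict.empty).getD first 0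
          = (((PySem.List.enumerate (first :: rest) 0).map (fun p => p.2 - p.1)).count first : Int) := by
      have h := PySem.Dict.getD_foldl_insert_add_one
        (l := (PySem.List.enumerate (first :: rest) 0).map (fun p => p.2 - p.1))
        (d := (PySem.Dict.empty : PySem.Dict Int Int)) (v := first)
      rw [List.foldl_map] at h
      simpa [PySem.Dict.getD_empty] using h
    rw [hfold]
    -- A's side via the loop invariant at s = 1
    have hA := pvALoop_eq rest first 1 n_wilds
    have h1 : first + 1 - 1 = first := by ring
    rw [h1] at hA
    rw [hA]
    -- B's count over the normalized full list = 1 + matches among the tail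
    have henum : PySem.List.enumerate (first :: rest) 0 = (0, first) :: PySem.List.enumerate rest 1 := by
      rw [PySem.List.enumerate_cons]; norm_num
    rw [henum]
    set l := PySem.List.enumerate rest 1 with hl
    have hcount : ((((0, first) :: l).map (fun p => p.2 - p.1)).count first)
        = 1 + (l.filter (fun p => decide (p.2 - p.1 = first))).length := by
      rw [List.map_cons, List.count_cons, pvCountMap]
      simp; omega
    rw [hcount]
    -- mismatches + matches partition the tail
    have hmis : (l.filter (fun p => decide (p.2 ≠ first + p.1))) =
        (l.filter (fun p => !(decide (p.2 - p.1 = first)))) := by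
      apply List.filter_congr
      intro p _
      by_cases h : p.2 = first + p.1
      · have h2 : p.2 - p.1 = first := by omega
        simp [h, h2]
      · have h2 : ¬ (p.2 - p.1 = first) := by omega
        simp [h, h2]
    have hpart := pvFilter_partition (fun p : Int × Int => decide (p.2 - p.1 = first)) l
    have hlen : l.length = rest.length := by
      rw [hl]; exact PySem.List.length_enumerate rest 1
    simp only [List.length_cons]
    rw [hmis, decide_eq_decide]
    push_cast
    omega
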